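-- pv_equiv track=rewrite | github.com/SongbiaoZhu/python_spider | pics_spider/kingSkinSpiderObj.py | getSkinInfo
-- ===== SOURCE A (Python) =====
-- def getSkinInfo(heroList):
--     skinName = []
--     skinUrl = []
--     for x in heroList:
--         skins = x[2].split('|')
--         for s in skins:
--             name = x[0] + '_' + x[1] + '_' + s + '.jpeg'
--             skinName.append(name)
--         num = len(skins)
--         for i in range(1,num+1):
--             url =  'http://game.gtimg.cn/images/yxzj/img201606/skin/hero-info/{}/{}-bigskin-{}.jpg'.format(x[0], x[0], str(i))
--             skinUrl.append(url)
--     skinInfo = dict(zip(skinName, skinUrl))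
--     return skinInfo
-- ===== SOURCE B (Python) =====
-- def getSkinInfo(heroList):
--     skinInfo = {}
--     for x in heroList:
--         for i, s in enumerate(x[2].split('|'), start=1):
--             name = x[0] + '_' + x[1] + '_' + s + '.jpeg'
--             skinInfo[name] = 'http://game.gtimg.cn/images/yxzj/img201606/skin/hero-info/{}/{}-bigskin-{}.jpg'.format(x[0], x[0], str(i))
--     return skinInfo
-- ===== Notes on version B (the rewrite author's own statement) =====
-- stated objective: simpler
-- what changed: Replaces the two parallel accumulator lists, the separate range(1,num+1) url loop and the final dict(zip(...)) step with a single fused pass that fills the dict directly via enumerate(skins, start=1).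
import Mathlib
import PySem

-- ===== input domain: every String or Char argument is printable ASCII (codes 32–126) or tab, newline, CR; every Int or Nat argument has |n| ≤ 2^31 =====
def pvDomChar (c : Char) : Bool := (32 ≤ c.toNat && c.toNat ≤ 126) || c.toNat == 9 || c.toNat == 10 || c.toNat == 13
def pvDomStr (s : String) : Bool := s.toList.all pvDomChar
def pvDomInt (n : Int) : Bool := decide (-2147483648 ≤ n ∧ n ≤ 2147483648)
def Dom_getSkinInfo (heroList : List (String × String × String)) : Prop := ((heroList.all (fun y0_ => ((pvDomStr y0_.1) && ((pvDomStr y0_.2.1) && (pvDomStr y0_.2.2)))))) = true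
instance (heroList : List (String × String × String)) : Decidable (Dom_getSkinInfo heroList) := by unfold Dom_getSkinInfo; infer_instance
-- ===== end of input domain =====

-- B fuses A's two parallel accumulator lists and the final dict(zip(...)) into one direct dict-filling pass (objective: simpler).

-- ===== PORT A =====
-- x[2].split('|'): exact port of str.split with a non-empty separator (PySem.Chars.splitOn)
def pvSplitBar (s : String) : List String :=
  (PySem.Chars.splitOn s.toList ['|']).map String.ofList

def getSkinInfo (heroList : List (String × String × String)) : List (String × String) :=
  let st := heroList.foldl (fun (st : List String × List String) x =>
    let skins := pvSplitBar x.2.2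
    let skinName := skins.foldl (fun acc s => acc ++ [x.1 ++ "_" ++ x.2.1 ++ "_" ++ s ++ ".jpeg"]) st.1
    let num := PySem.List.len skins
    let skinUrl := (PySem.List.pyRange 1 (num + 1) 1).foldl (fun acc i =>
      acc ++ ["http://game.gtimg.cn/images/yxzj/img201606/skin/hero-info/" ++ x.1 ++ "/" ++ x.1 ++ "-bigskin-" ++ PySem.Int.toStr i ++ ".jpg"]) st.2
    (skinName, skinUrl)) ([], [])
  (PySem.Dict.ofList (st.1.zip st.2)).items

-- ===== PORT B =====
def getSkinInfo_alt (heroList : List (String × String × String)) : List (String × String) :=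
  (heroList.foldl (fun (d : PySem.Dict String String) x =>
    (PySem.List.enumerate (pvSplitBar x.2.2) 1).foldl (fun d p =>
      d.insert (x.1 ++ "_" ++ x.2.1 ++ "_" ++ p.2 ++ ".jpeg")
        ("http://game.gtimg.cn/images/yxzj/img201606/skin/hero-info/" ++ x.1 ++ "/" ++ x.1 ++ "-bigskin-" ++ PySem.Int.toStr p.1 ++ ".jpg")) d)
    PySem.Dict.empty).items

-- ===== PRECONDITION & SPEC =====
def Spec_getSkinInfo (heroList : List (String × String × String)) (out : List (String × String)) : Prop := out = getSkinInfo_alt heroList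
instance (heroList : List (String × String × String)) (out : List (String × String)) : Decidable (Spec_getSkinInfo heroList out) := by unfold Spec_getSkinInfo; infer_instance

-- ===== CLAIM (what is proved, stated in full; the proofs are below) =====
def Claim_equal_getSkinInfo : Prop := ∀ (heroList : List (String × String × String)), Dom_getSkinInfo heroList → Spec_getSkinInfo heroList (getSkinInfo heroList)

-- ===== LEMMAS AND PROOFS =====

-- the per-hero name and url builders, named for the proofs only
def pvName (x : String × String × String) (s : String) : String :=
  x.1 ++ "_" ++ x.2.1 ++ "_" ++ s ++ ".jpeg"
def pvUrl (x : String × String × String) (i : Int) : String :=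
  "http://game.gtimg.cn/images/yxzj/img201606/skin/hero-info/" ++ x.1 ++ "/" ++ x.1 ++ "-bigskin-" ++ PySem.Int.toStr i ++ ".jpg"

theorem pvLen_pyRange (n : Nat) : (PySem.List.pyRange 1 ((n : Int) + 1) 1).length = n := by
  have h := congrArg List.length (PySem.List.map_fst_enumerate (List.range n) 1)
  simp only [List.length_map, PySem.List.length_enumerate, List.length_range] at h
  rw [show ((n : Int) + 1) = 1 + (n : Int) by ring]
  exact h.symm

-- A's accumulator fold computes the two flatMaps
theorem pvA_fold (hl : List (String × String × String)) (acc : List String × List String) :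
    hl.foldl (fun (st : List String × List String) x =>
      let skins := pvSplitBar x.2.2
      let skinName := skins.foldl (fun acc s => acc ++ [pvName x s]) st.1
      let num := PySem.List.len skins
      let skinUrl := (PySem.List.pyRange 1 (num + 1) 1).foldl (fun acc i => acc ++ [pvUrl x i]) st.2
      (skinName, skinUrl)) acc
    = (acc.1 ++ hl.flatMap (fun x => (pvSplitBar x.2.2).map (pvName x)),
       acc.2 ++ hl.flatMap (fun x => (PySem.List.pyRange 1 (PySem.List.len (pvSplitBar x.2.2) + 1) 1).map (pvUrl x))) := by
  induction hl generalizing acc with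
  | nil => simp
  | cons x t ih =>
    rw [List.foldl_cons, ih]
    simp only [PySem.List.foldl_append_singleton_eq_map, List.flatMap_cons, List.append_assoc]

-- zip of the per-hero name list with the per-hero url list is the enumerate map
theorem pvZip_enum (x : String × String × String) (skins : List String) :
    (skins.map (pvName x)).zip ((PySem.List.pyRange 1 ((skins.length : Int) + 1) 1).map (pvUrl x))
    = (PySem.List.enumerate skins 1).map (fun p => (pvName x p.2, pvUrl x p.1)) := by
  have h1 : PySem.List.pyRange 1 ((skins.length : Int) + 1) 1
      = (PySem.List.enumerate skins 1).map (·.1) := by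
    rw [PySem.List.map_fst_enumerate]; ring_nf
  have h2 : skins.map (pvName x)
      = (PySem.List.enumerate skins 1).map (fun p => pvName x p.2) := by
    conv_lhs => rw [← PySem.List.map_snd_enumerate skins 1]
    rw [List.map_map]; rfl
  rw [h1, h2, List.map_map, List.zip_map']
  rfl

-- zip distributes over the two flatMaps (equal piece lengths)
theorem pvZip_flatMap (hl : List (String × String × String)) :
    (hl.flatMap (fun x => (pvSplitBar x.2.2).map (pvName x))).zip
      (hl.flatMap (fun x => (PySem.List.pyRange 1 (PySem.List.len (pvSplitBar x.2.2) + 1) 1).map (pvUrl x)))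
    = hl.flatMap (fun x => (PySem.List.enumerate (pvSplitBar x.2.2) 1).map
        (fun p => (pvName x p.2, pvUrl x p.1))) := by
  induction hl with
  | nil => simp
  | cons x t ih =>
    simp only [PySem.List.len_eq] at ih ⊢
    simp only [List.flatMap_cons]
    rw [List.zip_append (by
      simp only [List.length_map]
      exact (pvLen_pyRange (pvSplitBar x.2.2).length).symm), ih, pvZip_enum]

-- ===== VERDICT (by name: the statement is the Claim_ definition above) =====
theorem getSkinInfo_spec : Claim_equal_getSkinInfo := by
  intro hl _
  show getSkinInfo hl = getSkinInfo_alt hl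
  unfold getSkinInfo getSkinInfo_alt
  simp only []
  rw [show (fun (st : List String × List String) (x : String × String × String) =>
      ((pvSplitBar x.2.2).foldl (fun acc s => acc ++ [x.1 ++ "_" ++ x.2.1 ++ "_" ++ s ++ ".jpeg"]) st.1,
       (PySem.List.pyRange 1 (PySem.List.len (pvSplitBar x.2.2) + 1) 1).foldl (fun acc i =>
         acc ++ ["http://game.gtimg.cn/images/yxzj/img201606/skin/hero-info/" ++ x.1 ++ "/" ++ x.1 ++ "-bigskin-" ++ PySem.Int.toStr i ++ ".jpg"]) st.2))
    = (fun (st : List String × List String) x =>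
      ((pvSplitBar x.2.2).foldl (fun acc s => acc ++ [pvName x s]) st.1,
       (PySem.List.pyRange 1 (PySem.List.len (pvSplitBar x.2.2) + 1) 1).foldl (fun acc i => acc ++ [pvUrl x i]) st.2)) from rfl]
  rw [pvA_fold]
  simp only [List.nil_append]
  rw [pvZip_flatMap]
  show (PySem.Dict.ofList _).items = _
  rw [show ∀ (ps : List (String × String)), PySem.Dict.ofList ps
      = ps.foldl (fun d p => d.insert p.1 p.2) PySem.Dict.empty from fun _ => rfl]
  rw [List.foldl_flatMap]
  have hfun : (fun (acc : PySem.Dict String String) (x : String × String × String) =>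
      ((PySem.List.enumerate (pvSplitBar x.2.2) 1).map
        (fun p => (pvName x p.2, pvUrl x p.1))).foldl (fun d p => d.insert p.1 p.2) acc)
      = (fun (acc : PySem.Dict String String) (x : String × String × String) =>
      (PySem.List.enumerate (pvSplitBar x.2.2) 1).foldl
        (fun d p => d.insert (pvName x p.2) (pvUrl x p.1)) acc) := by
    funext acc x
    rw [List.foldl_map]
  rw [hfun]
  rfl
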